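-- pv_equiv track=rewrite | github.com/bhargavachary/super-coder-proxy | proxy/context.py | _compress_system_prompt
-- ===== SOURCE A (Python) =====
-- def _compress_system_prompt(text: str, budget: int) -> str:
--     """Compress a Continue.dev system prompt to fit *budget* chars.
--
--     Strategy: score each line by how actionable it is (must/never/always/
--     do/don't/should/avoid), keep top-scoring lines while preserving original
--     order.  This typically drops ~60% of the generic framing prose while
--     keeping all the actual coding rules.
--     """
--     if len(text) <= budget:
--         return text
--
--     _PRIORITY_WORDS = {
--         "must", "never", "always", "should not",
--         "avoid", "rule:", "important:", "note:",
--         "format:", "make sure", "ensure",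
--         "do not", "you must", "you should",
--     }
--     lines = text.splitlines()
--     scored: list[tuple[int, int, str]] = []
--     for i, line in enumerate(lines):
--         ll = line.lower()
--         score = 1
--         if any(w in ll for w in _PRIORITY_WORDS):
--             score += 3
--         if line.startswith("#"):       # heading
--             score += 2
--         if line.startswith("-") or line.startswith("*"):  # bullet
--             score += 1
--         if len(line) > 300:            # very long → lower priority
--             score -= 1
--         scored.append((score, i, line))
--
--     scored.sort(key=lambda x: (-x[0], x[1]))
--     selected: set[int] = set()
--     total = 0
--     for _, i, line in scored:
--         if total + len(line) + 1 > budget: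
--             break
--         selected.add(i)
--         total += len(line) + 1
--
--     return "\n".join(lines[i] for i in sorted(selected))
-- ===== SOURCE B (Python) =====
-- # Bucket-based re-implementation: group lines by score (scores are bounded 0..7),
-- # then walk scores from high to low instead of sorting by (-score, index).
--
-- _PRIORITY_WORDS = (
--     "must", "never", "always", "should not",
--     "avoid", "rule:", "important:", "note:",
--     "format:", "make sure", "ensure",
--     "do not", "you must", "you should",
-- )
--
--
-- def _score_line(line: str) -> int:
--     """Score of a line; always in 0..7."""
--     ll = line.lower()
--     score = 1
--     if any(w in ll for w in _PRIORITY_WORDS):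
--         score += 3
--     if line.startswith("#"):
--         score += 2
--     if line.startswith("-") or line.startswith("*"):
--         score += 1
--     if len(line) > 300:
--         score -= 1
--     return score
--
--
-- def _compress_system_prompt(text: str, budget: int) -> str:
--     if len(text) <= budget:
--         return text
--
--     lines = text.splitlines()
--     buckets: dict[int, list[tuple[int, str]]] = {}
--     for i, line in enumerate(lines):
--         buckets.setdefault(_score_line(line), []).append((i, line))
--
--     chosen: list[int] = []
--     total = 0
--     done = False
--     for s in range(7, -1, -1):
--         if done:
--             break
--         for i, line in buckets.get(s, []):
--             if total + len(line) + 1 > budget: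
--                 done = True
--                 break
--             chosen.append(i)
--             total += len(line) + 1
--
--     chosen.sort()
--     return "\n".join(lines[i] for i in chosen)
-- ===== Notes on version B (the rewrite author's own statement) =====
-- stated objective: alternative
-- what changed: Replaces the build-one-list-and-sort-by-(-score,index) pass with a bucket pass: lines are grouped into a dict score -> [(index, line)] (scores are bounded 0..7), then a two-level walk from the highest score downward greedily takes lines within the budget, breaking out of both loops on the first overflow, and finally the chosen indices are sorted.
import Mathlib
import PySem

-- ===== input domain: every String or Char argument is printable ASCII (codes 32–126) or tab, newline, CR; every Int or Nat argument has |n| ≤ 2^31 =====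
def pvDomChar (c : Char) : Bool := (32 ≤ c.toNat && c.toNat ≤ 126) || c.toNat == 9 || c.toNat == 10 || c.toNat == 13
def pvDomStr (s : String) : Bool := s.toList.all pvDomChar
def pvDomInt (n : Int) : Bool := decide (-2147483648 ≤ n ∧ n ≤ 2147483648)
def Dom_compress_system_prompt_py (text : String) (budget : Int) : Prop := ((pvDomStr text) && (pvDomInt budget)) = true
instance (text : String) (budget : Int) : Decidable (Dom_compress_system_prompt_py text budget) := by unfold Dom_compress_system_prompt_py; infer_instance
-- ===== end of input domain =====

-- B replaces the sort by (-score, index) with a bucket pass over the bounded scores 0..7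
-- (group lines by score, then walk scores from high to low); same return value, alternative algorithm.

-- ===== PORT A =====
def pvWordsA : List String :=
  ["must", "never", "always", "should not",
   "avoid", "rule:", "important:", "note:",
   "format:", "make sure", "ensure",
   "do not", "you must", "you should"]

-- the greedy selection loop over the sorted scored list ('for _, i, line in scored: … break')
def pvLoopA (budget : Int) : List (Int × Int × String) → PySem.Set Int → Int → PySem.Set Int
  | [], selected, _ => selected
  | t :: rest, selected, total =>
    if total + PySem.Str.len t.2.2 + 1 > budget then selected
    else pvLoopA budget rest (PySem.Set.add selected t.2.1) (total + PySem.Str.len t.2.2 + 1)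

def compress_system_prompt_py (text : String) (budget : Int) : String :=
  if PySem.Str.len text ≤ budget then text
  else
    let lines := PySem.Str.splitlines text
    let scored : List (Int × Int × String) :=
      (PySem.List.enumerate lines 0).foldl (fun acc p =>
        let line := p.2
        let ll := PySem.Str.lower line
        let score : Int := 1
        let score := if pvWordsA.any (fun w => PySem.Str.isIn w ll) then score + 3 else score
        let score := if PySem.Str.startswith line "#" then score + 2 else score
        let score := if PySem.Str.startswith line "-" || PySem.Str.startswith line "*" then score + 1 else score
        let score := if PySem.Str.len line > 300 then score - 1 else score
        acc ++ [(score, p.1, line)]) []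
    let scoredSorted := PySem.List.sorted2 scored (fun x => -x.1) (fun x => x.2.1) false
    let selected := pvLoopA budget scoredSorted PySem.Set.empty 0
    -- 'lines[i] for i in sorted(selected)': every i is an enumerate index, so pyGetD is exact here
    PySem.Str.join "\n" ((PySem.List.sorted selected (fun x => x) false).map (fun i => PySem.List.pyGetD lines i ""))

-- ===== PORT B =====
def pvWordsB : List String :=
  ["must", "never", "always", "should not",
   "avoid", "rule:", "important:", "note:",
   "format:", "make sure", "ensure",
   "do not", "you must", "you should"]

def pvScoreLineB (line : String) : Int :=
  let ll := PySem.Str.lower line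
  let score : Int := 1
  let score := if pvWordsB.any (fun w => PySem.Str.isIn w ll) then score + 3 else score
  let score := if PySem.Str.startswith line "#" then score + 2 else score
  let score := if PySem.Str.startswith line "-" || PySem.Str.startswith line "*" then score + 1 else score
  if PySem.Str.len line > 300 then score - 1 else score

-- inner loop over one bucket: returns (state, done-flag); the flag is the 'break out of both loops'
def pvInnerB (budget : Int) : List (Int × String) → List Int × Int → (List Int × Int) × Bool
  | [], st => (st, false)
  | q :: rest, st =>
    if st.2 + PySem.Str.len q.2 + 1 > budget then (st, true)
    else pvInnerB budget rest (st.1 ++ [q.1], st.2 + PySem.Str.len q.2 + 1)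

def compress_system_prompt_py_alt (text : String) (budget : Int) : String :=
  if PySem.Str.len text ≤ budget then text
  else
    let lines := PySem.Str.splitlines text
    let buckets : PySem.Dict Int (List (Int × String)) :=
      (PySem.List.enumerate lines 0).foldl
        (fun d q => d.modify (pvScoreLineB q.2) [] (· ++ [(q.1, q.2)])) PySem.Dict.empty
    let st := (PySem.List.pyRange 7 (-1) (-1)).foldl
        (fun st s => if st.2 then st else pvInnerB budget (buckets.getD s []) st.1) (([], 0), false)
    let chosen := PySem.List.sorted st.1.1 (fun x => x) false
    -- 'lines[i] for i in chosen': every i is an enumerate index, so pyGetD is exact here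
    PySem.Str.join "\n" (chosen.map (fun i => PySem.List.pyGetD lines i ""))

-- ===== PRECONDITION & SPEC =====
def Spec_compress_system_prompt_py (text : String) (budget : Int) (out : String) : Prop := out = compress_system_prompt_py_alt text budget
instance (text : String) (budget : Int) (out : String) : Decidable (Spec_compress_system_prompt_py text budget out) := by unfold Spec_compress_system_prompt_py; infer_instance

-- ===== CLAIM (what is proved, stated in full; the proofs are below) =====
def Claim_equal_compress_system_prompt_py : Prop := ∀ (text : String) (budget : Int), Dom_compress_system_prompt_py text budget → Spec_compress_system_prompt_py text budget (compress_system_prompt_py text budget)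

-- ===== LEMMAS AND PROOFS =====

-- B's score is bounded: 0 ≤ score ≤ 7
theorem pvScoreLineB_bounds (line : String) : 0 ≤ pvScoreLineB line ∧ pvScoreLineB line ≤ 7 := by
  unfold pvScoreLineB
  split_ifs <;> simp <;> omega

-- sorted2 with Int keys is sorted with the lexicographic key
theorem pvSorted2_eq_sorted_lex {α : Type} (xs : List α) (k1 k2 : α → Int) :
    PySem.List.sorted2 xs k1 k2 false
      = PySem.List.sorted xs (fun x => (toLex (k1 x, k2 x) : Int ×ₗ Int)) false := by
  rw [PySem.List.sorted_eq_foldl_insertBy]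
  unfold PySem.List.sorted2
  simp only
  have hfun : (fun a b => (decide (k1 a < k1 b) || (!decide (k1 b < k1 a) && decide (k2 a < k2 b))))
      = (fun a b => decide ((toLex (k1 a, k2 a) : Int ×ₗ Int) < toLex (k1 b, k2 b))) := by
    funext a b
    by_cases h1 : k1 a < k1 b <;> by_cases h2 : k1 b < k1 a <;> by_cases h3 : k2 a < k2 b <;>
      simp [h1, h2, h3, Prod.Lex.lt_iff] <;> omega
  rw [hfun]
  simp

-- bucket decomposition is a permutation
theorem pvFlatMap_filter_perm (svals : List Int) (l : List (Int × Int × String))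
    (hnd : svals.Nodup) (hmem : ∀ x ∈ l, x.1 ∈ svals) :
    (svals.flatMap (fun s => l.filter (fun x => x.1 == s))).Perm l := by
  induction svals generalizing l with
  | nil =>
    cases l with
    | nil => simp
    | cons x t => exact absurd (hmem x (by simp)) (by simp)
  | cons s svals ih =>
    rw [List.flatMap_cons]
    have hfix : ∀ s' ∈ svals, l.filter (fun x => x.1 == s')
        = (l.filter (fun x => !(x.1 == s))).filter (fun x => x.1 == s') := by
      intro s' hs'
      have hne : s' ≠ s := fun h => (List.nodup_cons.mp hnd).1 (h ▸ hs')
      rw [List.filter_filter]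
      apply List.filter_congr
      intro x hx
      by_cases hxs : x.1 = s' <;> simp [hxs, hne]
    have hmap : svals.map (fun s' => l.filter (fun x => x.1 == s'))
        = svals.map (fun s' => (l.filter (fun x => !(x.1 == s))).filter (fun x => x.1 == s')) :=
      List.map_congr_left hfix
    have hfm : svals.flatMap (fun s' => l.filter (fun x => x.1 == s'))
        = svals.flatMap (fun s' => (l.filter (fun x => !(x.1 == s))).filter (fun x => x.1 == s')) := by
      rw [List.flatMap_def, List.flatMap_def, hmap]
    rw [hfm]
    have hperm' : (svals.flatMap (fun s' =>
        (l.filter (fun x => !(x.1 == s))).filter (fun x => x.1 == s'))).Perm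
          (l.filter (fun x => !(x.1 == s))) := by
      apply ih
      · exact (List.nodup_cons.mp hnd).2
      · intro x hx
        rcases List.mem_filter.mp hx with ⟨hxl, hxs⟩
        have := hmem x hxl
        simp only [List.mem_cons] at this
        rcases this with h | h
        · simp [h] at hxs
        · exact h
    exact ((List.Perm.append_left _ hperm').trans (List.filter_append_perm _ l))

-- pvInnerB on an appended list
theorem pvInnerB_append (budget : Int) (b c : List (Int × String)) (st : List Int × Int) :
    pvInnerB budget (b ++ c) st
      = if (pvInnerB budget b st).2 then pvInnerB budget b st
        else pvInnerB budget c (pvInnerB budget b st).1 := by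
  induction b generalizing st with
  | nil => simp [pvInnerB]
  | cons q rest ih =>
    by_cases h : st.2 + PySem.Str.len q.2 + 1 > budget
    · simp only [List.cons_append, pvInnerB, if_pos h]; simp
    · simp only [List.cons_append, pvInnerB, if_neg h]; exact ih _

-- the outer fold skips everything once the flag is set
theorem pvOuter_skip (budget : Int) (bs : List (List (Int × String)))
    (st : (List Int × Int) × Bool) (h : st.2 = true) :
    bs.foldl (fun st b => if st.2 then st else pvInnerB budget b st.1) st = st := by
  induction bs generalizing st with
  | nil => rfl
  | cons b bs ih => simpa [List.foldl_cons, h] using ih st h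

-- the two-level loop over buckets equals the single loop over the flattened list
theorem pvOuter_flatten (budget : Int) (bs : List (List (Int × String))) (st : List Int × Int) :
    (bs.foldl (fun st b => if st.2 then st else pvInnerB budget b st.1) (st, false)).1
      = (pvInnerB budget bs.flatten st).1 := by
  induction bs generalizing st with
  | nil => simp [pvInnerB]
  | cons b bs ih =>
    simp only [List.foldl_cons, List.flatten_cons, if_neg Bool.false_ne_true]
    rw [pvInnerB_append]
    rcases h : (pvInnerB budget b st).2 with _ | _
    · have hst : pvInnerB budget b st = ((pvInnerB budget b st).1, false) := by
        cases hpv : pvInnerB budget b st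
        · simp_all
      rw [if_neg Bool.false_ne_true, hst, ih]
    · rw [if_pos rfl, pvOuter_skip budget bs _ h]

-- A's Set-based loop equals B's inner loop on the projected list, for fresh distinct indices
theorem pvLoopA_eq_inner (budget : Int) (xs : List (Int × Int × String)) (sel : PySem.Set Int) (tot : Int)
    (hnd : (xs.map (fun t => t.2.1)).Nodup) (hfresh : ∀ t ∈ xs, t.2.1 ∉ sel) :
    pvLoopA budget xs sel tot = (pvInnerB budget (xs.map (fun t => t.2)) (sel, tot)).1.1 := by
  induction xs generalizing sel tot with
  | nil => simp [pvLoopA, pvInnerB]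
  | cons t rest ih =>
    by_cases h : tot + PySem.Str.len t.2.2 + 1 > budget
    · simp only [pvLoopA, pvInnerB, List.map_cons, if_pos h]
    · have hmem : t.2.1 ∉ sel := hfresh t (by simp)
      have hadd : PySem.Set.add sel t.2.1 = sel ++ [t.2.1] := by
        simp [PySem.Set.add, PySem.Set.contains, hmem]
      simp only [pvLoopA, pvInnerB, List.map_cons, if_neg h]

      rw [hadd, ih _ _ (by simpa using hnd.of_cons)]
      intro u hu
      simp only [List.mem_append, List.mem_singleton, not_or]
      refine ⟨hfresh u (List.mem_cons_of_mem _ hu), ?_⟩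
      have := (List.nodup_cons.mp hnd).1
      intro he
      exact this (by simpa [← he] using List.mem_map_of_mem (f := fun t => t.2.1) hu)

-- A's scoring loop builds the scored list of the mapped form
theorem pvScoredA_eq (lines : List String) :
    (PySem.List.enumerate lines 0).foldl (fun acc p =>
        let line := p.2
        let ll := PySem.Str.lower line
        let score : Int := 1
        let score := if pvWordsA.any (fun w => PySem.Str.isIn w ll) then score + 3 else score
        let score := if PySem.Str.startswith line "#" then score + 2 else score
        let score := if PySem.Str.startswith line "-" || PySem.Str.startswith line "*" then score + 1 else score
        let score := if PySem.Str.len line > 300 then score - 1 else score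
        acc ++ [(score, p.1, line)]) []
      = (PySem.List.enumerate lines 0).map (fun q => (pvScoreLineB q.2, q.1, q.2)) := by
  rw [PySem.List.foldl_append_singleton_eq_map]
  rfl

-- the selected indices agree: A's sort-then-scan equals B's bucket walk
theorem pvSelect_eq (budget : Int) (lines : List String) :
    pvLoopA budget
      (PySem.List.sorted2 ((PySem.List.enumerate lines 0).map (fun q => (pvScoreLineB q.2, q.1, q.2)))
        (fun x => -x.1) (fun x => x.2.1) false) PySem.Set.empty 0
    = ((PySem.List.pyRange 7 (-1) (-1)).foldl
        (fun st s => if st.2 then st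
          else pvInnerB budget
            (((PySem.List.enumerate lines 0).foldl
               (fun d q => d.modify (pvScoreLineB q.2) [] (· ++ [(q.1, q.2)])) PySem.Dict.empty).getD s [])
            st.1) (([], 0), false)).1.1 := by
  set scored : List (Int × Int × String) :=
    (PySem.List.enumerate lines 0).map (fun q => (pvScoreLineB q.2, q.1, q.2)) with hscored
  set svals := PySem.List.pyRange 7 (-1) (-1) with hsv
  have hsvlit : svals = [7, 6, 5, 4, 3, 2, 1, 0] := by decide
  set flat := svals.flatMap (fun s => scored.filter (fun x => x.1 == s)) with hflat
  have hbound : ∀ x ∈ scored, x.1 ∈ svals := by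
    intro x hx
    rw [hscored] at hx
    rcases List.mem_map.mp hx with ⟨q, _, rfl⟩
    have := pvScoreLineB_bounds q.2
    rw [hsvlit]
    simp only [List.mem_cons, List.not_mem_nil, or_false]
    omega
  have hperm : flat.Perm scored :=
    pvFlatMap_filter_perm svals scored (by rw [hsvlit]; decide) hbound
  have hpairIdx : scored.Pairwise (fun a b => a.2.1 < b.2.1) := by
    rw [hscored]
    exact List.Pairwise.map _ (fun a b h => h) (PySem.List.pairwise_lt_enumerate lines 0)
  have hpw : flat.Pairwise (fun a b =>
      (toLex (-a.1, a.2.1) : Int ×ₗ Int) < toLex (-b.1, b.2.1)) := by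
    rw [hflat, List.pairwise_flatMap]
    constructor
    · intro s _
      refine (hpairIdx.filter (fun x => x.1 == s)).imp_of_mem ?_
      intro a b ha hb hab
      have h1 : a.1 = s := by simpa using (List.mem_filter.mp ha).2
      have h2 : b.1 = s := by simpa using (List.mem_filter.mp hb).2
      simp only [Prod.Lex.lt_iff, ofLex_toLex]
      right
      exact ⟨by omega, hab⟩
    · have hgt : svals.Pairwise (fun a b => b < a) := by rw [hsvlit]; decide
      refine hgt.imp ?_
      intro s s' hss x hx y hy
      have h1 : x.1 = s := by simpa using (List.mem_filter.mp hx).2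
      have h2 : y.1 = s' := by simpa using (List.mem_filter.mp hy).2
      simp only [Prod.Lex.lt_iff, ofLex_toLex]
      left
      omega
  have hsorted : PySem.List.sorted2 scored (fun x => -x.1) (fun x => x.2.1) false = flat := by
    rw [pvSorted2_eq_sorted_lex]
    exact PySem.List.sorted_eq_of_perm_of_pairwise_lt scored flat
      (fun x => (toLex (-x.1, x.2.1) : Int ×ₗ Int)) hperm hpw
  have hmapidx : scored.map (fun t => t.2.1) = PySem.List.pyRange 0 (0 + (lines.length : Int)) 1 := by
    rw [hscored, List.map_map]
    simpa using PySem.List.map_fst_enumerate lines 0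
  have hnodupF : (flat.map (fun t => t.2.1)).Nodup := by
    have h1 : (scored.map (fun t => t.2.1)).Nodup := by
      rw [hmapidx]; exact PySem.List.nodup_pyRange_one 0 (0 + (lines.length : Int))
    exact ((hperm.map (fun t => t.2.1)).symm).nodup h1
  have hbuckets : ∀ s : Int,
      (((PySem.List.enumerate lines 0).foldl
        (fun d q => d.modify (pvScoreLineB q.2) [] (· ++ [(q.1, q.2)])) PySem.Dict.empty).getD s [])
      = (scored.filter (fun x => x.1 == s)).map (fun x => x.2) := by
    intro s
    have hfm : (PySem.List.enumerate lines 0).foldl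
        (fun d q => d.modify (pvScoreLineB q.2) [] (· ++ [(q.1, q.2)])) PySem.Dict.empty
        = scored.foldl (fun d p => d.modify p.1 [] (· ++ [p.2])) PySem.Dict.empty := by
      rw [hscored, List.foldl_map]
    rw [hfm, PySem.Dict.getD_foldl_modify_append]
    simp [PySem.Dict.empty, PySem.Dict.getD, PySem.Dict.get?]
  -- A side
  rw [hsorted, pvLoopA_eq_inner budget flat PySem.Set.empty 0 hnodupF (by intro t _; simp [PySem.Set.empty])]
  -- B side
  have hmapb : svals.map (fun s =>
      (((PySem.List.enumerate lines 0).foldl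
        (fun d q => d.modify (pvScoreLineB q.2) [] (· ++ [(q.1, q.2)])) PySem.Dict.empty).getD s []))
      = svals.map (fun s => (scored.filter (fun x => x.1 == s)).map (fun x => x.2)) :=
    List.map_congr_left (fun s _ => hbuckets s)
  have hfold : (svals.map (fun s =>
      (((PySem.List.enumerate lines 0).foldl
        (fun d q => d.modify (pvScoreLineB q.2) [] (· ++ [(q.1, q.2)])) PySem.Dict.empty).getD s []))).foldl
        (fun st b => if st.2 then st else pvInnerB budget b st.1) (([], 0), false)
      = svals.foldl (fun st s => if st.2 then st
          else pvInnerB budget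
            (((PySem.List.enumerate lines 0).foldl
               (fun d q => d.modify (pvScoreLineB q.2) [] (· ++ [(q.1, q.2)])) PySem.Dict.empty).getD s [])
            st.1) (([], 0), false) := by
    rw [List.foldl_map]
  rw [← hfold, hmapb, pvOuter_flatten budget _ ([], 0)]
  have hflatten : (svals.map (fun s => (scored.filter (fun x => x.1 == s)).map (fun x => x.2))).flatten
      = flat.map (fun t => t.2) := by
    rw [hflat, List.map_flatMap, List.flatMap_def]
  rw [hflatten]
  rfl

-- ===== VERDICT (by name: the statement is the Claim_ definition above) =====
theorem compress_system_prompt_py_spec : Claim_equal_compress_system_prompt_py := by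
  intro text budget _
  unfold Spec_compress_system_prompt_py compress_system_prompt_py compress_system_prompt_py_alt
  by_cases hle : PySem.Str.len text ≤ budget
  · rw [if_pos hle, if_pos hle]
  · rw [if_neg hle, if_neg hle]
    dsimp only
    rw [pvScoredA_eq, pvSelect_eq]
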